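-- pv_equiv track=rewrite | github.com/patata22/BOJ | 프로그래머스/lv0/120843. 공 던지기/공 던지기.py | solution
-- ===== SOURCE A (Python) =====
-- def solution(numbers, k):
--     now=0
--     n=len(numbers)
--     count=1
--     while count<k:
--         now=(now+2)%n
--         count+=1
--     return numbers[now]
-- ===== SOURCE B (Python) =====
-- def solution(numbers, k):
--     steps = max(k - 1, 0)
--     return numbers[(2 * steps) % len(numbers)]
-- ===== Notes on version B (the rewrite author's own statement) =====
-- stated objective: faster
-- what changed: Replaces the O(k) simulation loop stepping the index k-1 times with the closed-form index (2*(k-1)) % n computed in O(1).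
import Mathlib
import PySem

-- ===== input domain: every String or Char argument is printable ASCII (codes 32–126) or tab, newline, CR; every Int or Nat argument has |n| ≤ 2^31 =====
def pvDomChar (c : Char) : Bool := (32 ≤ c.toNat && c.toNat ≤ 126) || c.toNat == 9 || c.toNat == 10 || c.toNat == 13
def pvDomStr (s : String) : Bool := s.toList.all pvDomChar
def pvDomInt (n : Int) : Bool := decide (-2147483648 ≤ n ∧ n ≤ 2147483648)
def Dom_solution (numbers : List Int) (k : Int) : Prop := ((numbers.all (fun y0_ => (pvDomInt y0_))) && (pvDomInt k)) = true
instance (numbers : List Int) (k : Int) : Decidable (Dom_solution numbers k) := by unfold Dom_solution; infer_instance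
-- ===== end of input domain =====

-- B replaces A's O(k) index-stepping loop by the closed-form index (2*(k-1)) % n, an O(1) lookup.


-- ===== PORT A =====
-- the while loop: mutates (now, count) while count < k; returns the final now
def solLoop (k n now count : Int) : Int :=
  if count < k then solLoop k n (PySem.Int.mod (now + 2) n) (count + 1) else now
termination_by (k - count).toNat
decreasing_by omega

def solution (numbers : List Int) (k : Int) : Int :=
  let n : Int := numbers.length
  let now := solLoop k n 0 1
  (PySem.List.pyGet? numbers now).getD 0   -- Pre_ guarantees the index is in range (none never hit)

-- ===== PORT B =====
def solution_alt (numbers : List Int) (k : Int) : Int :=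
  let steps := max (k - 1) 0
  (PySem.List.pyGet? numbers (PySem.Int.mod (2 * steps) numbers.length)).getD 0

-- ===== PRECONDITION & SPEC =====
-- Pre_ excludes only the empty list, on which A raises (IndexError if k ≤ 1, ZeroDivisionError otherwise).
def Pre_solution (numbers : List Int) (k : Int) : Prop := numbers ≠ []
instance (numbers : List Int) (k : Int) : Decidable (Pre_solution numbers k) := by unfold Pre_solution; infer_instance
def pvWitness_solution : List Int × Int := ([3, 5, 7], 2)
def Spec_solution (numbers : List Int) (k : Int) (out : Int) : Prop := out = solution_alt numbers k
instance (numbers : List Int) (k : Int) (out : Int) : Decidable (Spec_solution numbers k out) := by unfold Spec_solution; infer_instance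

-- ===== CLAIM (what is proved, stated in full; the proofs are below) =====
def Claim_equal_solution : Prop := ∀ (numbers : List Int) (k : Int), Dom_solution numbers k → Pre_solution numbers k → Spec_solution numbers k (solution numbers k)

-- ===== LEMMAS AND PROOFS =====
-- loop characterisation: starting from 0 ≤ now < n, the loop lands on (now + 2*(k-count)) % n
theorem solLoop_eq (k n : Int) (hn : 0 < n) :
    ∀ (now count : Int), 0 ≤ now → now < n →
      solLoop k n now count = PySem.Int.mod (now + 2 * max (k - count) 0) n := by
  intro now count h0 h1
  induction hfuel : (k - count).toNat using Nat.strong_induction_on generalizing now count with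
  | _ fuel ih =>
    rw [solLoop]
    split
    · rename_i hlt
      have hb := PySem.Int.mod_eq_emod_of_pos (a := now + 2) (b := n) hn
      have hb2 : 0 ≤ (now + 2) % n ∧ (now + 2) % n < n :=
        ⟨Int.emod_nonneg _ (by omega), Int.emod_lt_of_pos _ hn⟩
      rw [ih ((k - (count + 1)).toNat) (by omega) _ _ (by omega) (by omega) rfl]
      rw [PySem.Int.mod_eq_emod_of_pos hn, PySem.Int.mod_eq_emod_of_pos hn, PySem.Int.mod_eq_emod_of_pos hn, Int.emod_add_emod]
      congr 1
      omega
    · rename_i hge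
      have hmx : max (k - count) 0 = 0 := by omega
      rw [hmx, PySem.Int.mod_eq_emod_of_pos hn]
      norm_num
      exact (Int.emod_eq_of_lt h0 h1).symm

-- ===== VERDICT (by name: the statement is the Claim_ definition above) =====
theorem solution_spec : Claim_equal_solution := by
  intro numbers k _ hpre
  unfold Spec_solution
  simp only [solution, solution_alt]
  have hn : 0 < (numbers.length : Int) := by
    simp only [Int.natCast_pos, List.length_pos_iff]
    exact hpre
  rw [solLoop_eq k _ hn 0 1 le_rfl hn]
  norm_num
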